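-- pv_equiv track=rewrite | github.com/slaclab/mps_database | mps_database/tools/mps_app_reader.py | get_fault_base
-- ===== SOURCE A (Python) =====
-- def get_fault_base(fault):
--     out = fault.split('_')
--     val = fault
--     if out[len(out)-1] in ['T0', 'T1', 'T2', 'T3', 'T4', 'T5', 'T6', 'T7']:
--       val = '{0}'.format(out[0])
--       for index in range(1,len(out)-1):
--         val = '{0}_{1}'.format(val,out[index])
--     return val
-- ===== SOURCE B (Python) =====
-- def get_fault_base(fault):
--     if any(fault.endswith('_T' + d) for d in '01234567'):
--         return fault[:-3]
--     return fault
-- ===== Notes on version B (the rewrite author's own statement) =====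
-- stated objective: idiomatic
-- what changed: B drops the split/rejoin machinery entirely and directly tests whether the string ends with an underscore followed by T and a single digit 0-7, trimming the last three characters on a match.
import Mathlib
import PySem

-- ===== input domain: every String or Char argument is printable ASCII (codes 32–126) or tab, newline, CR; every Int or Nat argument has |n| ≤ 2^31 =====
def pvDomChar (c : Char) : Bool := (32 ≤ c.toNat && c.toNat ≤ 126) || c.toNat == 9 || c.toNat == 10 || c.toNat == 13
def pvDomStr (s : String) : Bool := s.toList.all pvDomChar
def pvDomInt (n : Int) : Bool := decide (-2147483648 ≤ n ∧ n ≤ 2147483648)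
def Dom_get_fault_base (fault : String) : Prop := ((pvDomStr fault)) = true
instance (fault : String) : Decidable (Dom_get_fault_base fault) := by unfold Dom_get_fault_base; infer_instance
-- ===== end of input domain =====

-- B replaces A's split/rejoin with a direct test of the trailing underscore-T-digit suffix, trimming three characters (idiomatic; same cost).

-- ===== PORT A =====
def get_fault_base (fault : String) : String :=
  let out := PySem.Chars.splitOn fault.toList ['_']
  let val := fault.toList
  let val :=
    if [['T','0'],['T','1'],['T','2'],['T','3'],['T','4'],['T','5'],['T','6'],['T','7']].contains
        (PySem.List.pyGetD out (PySem.List.len out - 1) []) then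
      (PySem.List.pyRange 1 (PySem.List.len out - 1) 1).foldl
        (fun v index => v ++ '_' :: PySem.List.pyGetD out index []) (PySem.List.pyGetD out 0 [])
    else val
  String.ofList val

-- ===== PORT B =====
def get_fault_base_alt (fault : String) : String :=
  if ['0','1','2','3','4','5','6','7'].any
      (fun d => PySem.Chars.endswith fault.toList ['_','T',d]) then
    String.ofList (PySem.List.slice fault.toList none (some (-3)))
  else fault

-- ===== PRECONDITION & SPEC =====
def Spec_get_fault_base (fault : String) (out : String) : Prop := out = get_fault_base_alt fault
instance (fault : String) (out : String) : Decidable (Spec_get_fault_base fault out) := by unfold Spec_get_fault_base; infer_instance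

-- ===== CLAIM (what is proved, stated in full; the proofs are below) =====
def Claim_equal_get_fault_base : Prop := ∀ (fault : String), Dom_get_fault_base fault → Spec_get_fault_base fault (get_fault_base fault)

-- ===== LEMMAS AND PROOFS =====

-- simple accumulator-free model of splitting on '_'
def pvSplitAux : List Char → List Char → List (List Char)
  | [], cur => [cur.reverse]
  | c :: rest, cur => if c = '_' then cur.reverse :: pvSplitAux rest [] else pvSplitAux rest (c :: cur)

theorem pv_go_eq (fuel : Nat) (l cur : List Char) (acc : List (List Char)) (h : l.length ≤ fuel) :
    PySem.Chars.splitOn.go ['_'] fuel l cur acc = acc.reverse ++ pvSplitAux l cur := by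
  induction fuel generalizing l cur acc with
  | zero =>
    have : l = [] := by cases l <;> simp_all
    subst this
    simp [PySem.Chars.splitOn.go, pvSplitAux]
  | succ f ih =>
    cases l with
    | nil => simp [PySem.Chars.splitOn.go, pvSplitAux]
    | cons c rest =>
      rw [PySem.Chars.splitOn.go]
      by_cases hc : c = '_'
      · subst hc
        rw [if_pos (by simp [List.isPrefixOf])]
        rw [show List.drop ['_'].length ('_' :: rest) = rest from rfl]
        rw [ih _ _ _ (by simpa using Nat.le_of_succ_le_succ h)]
        simp [pvSplitAux]
      · rw [if_neg (by simp [List.isPrefixOf, Ne.symm hc])]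
        rw [pvSplitAux, if_neg hc, ih _ _ _ (by simpa using Nat.le_of_succ_le_succ h)]

theorem pv_splitOn_eq (cs : List Char) : PySem.Chars.splitOn cs ['_'] = pvSplitAux cs [] := by
  simpa using pv_go_eq (cs.length + 1) cs [] [] (by omega)

theorem pvSplitAux_ne_nil (l cur : List Char) : pvSplitAux l cur ≠ [] := by
  induction l generalizing cur with
  | nil => simp [pvSplitAux]
  | cons c rest ih => by_cases hc : c = '_' <;> simp [pvSplitAux, hc, ih]

theorem pv_join_splitAux (l cur : List Char) :
    PySem.Chars.join ['_'] (pvSplitAux l cur) = cur.reverse ++ l := by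
  induction l generalizing cur with
  | nil => simp [pvSplitAux, PySem.Chars.join_singleton]
  | cons c rest ih =>
    by_cases hc : c = '_'
    · subst hc
      rw [pvSplitAux, if_pos rfl]
      obtain ⟨t, ts, ht⟩ := List.exists_cons_of_ne_nil (pvSplitAux_ne_nil rest [])
      rw [ht, PySem.Chars.join_cons_cons, ← ht, ih]
      simp
    · rw [pvSplitAux, if_neg hc, ih]
      simp

theorem pv_no_underscore (l cur : List Char) (hcur : '_' ∉ cur) :
    ∀ t ∈ pvSplitAux l cur, '_' ∉ t := by
  induction l generalizing cur with
  | nil =>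
    intro t ht
    simp only [pvSplitAux, List.mem_singleton] at ht
    subst ht; simpa using hcur
  | cons c rest ih =>
    by_cases hc : c = '_'
    · subst hc
      rw [pvSplitAux, if_pos rfl]
      intro t ht
      rcases List.mem_cons.mp ht with rfl | ht
      · simpa using hcur
      · exact ih [] (by simp) t ht
    · rw [pvSplitAux, if_neg hc]
      refine ih (c :: cur) ?_
      intro h
      rcases List.mem_cons.mp h with h | h
      · exact hc h.symm
      · exact hcur h

theorem pv_join_concat (xs : List (List Char)) (t : List Char) (h : xs ≠ []) :
    PySem.Chars.join ['_'] (xs ++ [t]) = PySem.Chars.join ['_'] xs ++ '_' :: t := by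
  induction xs with
  | nil => cases h rfl
  | cons a xs ih =>
    cases xs with
    | nil => simp [PySem.Chars.join_cons_cons, PySem.Chars.join_singleton]
    | cons b ys =>
      rw [show (a :: b :: ys) ++ [t] = a :: b :: (ys ++ [t]) from rfl,
        PySem.Chars.join_cons_cons, PySem.Chars.join_cons_cons ['_'] a b ys,
        show (b :: (ys ++ [t]) : List (List Char)) = (b :: ys) ++ [t] from rfl, ih (by simp)]
      simp

theorem pv_foldl_join (hs : List (List Char)) : ∀ (t0 : List Char) (tail : List (List Char)),
    (PySem.List.pyRange 1 (1 + (hs.length : Int)) 1).foldl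
      (fun v i => v ++ '_' :: PySem.List.pyGetD (t0 :: (hs ++ tail)) i []) t0
    = PySem.Chars.join ['_'] (t0 :: hs) := by
  induction hs using List.reverseRecOn with
  | nil =>
    intro t0 tail
    simp [PySem.List.pyRange, PySem.Chars.join_singleton]
  | append_singleton hs' t ih =>
    intro t0 tail
    have hlen : (((hs' ++ [t]).length : Nat) : Int) = (hs'.length : Int) + 1 := by simp
    rw [hlen]
    have hr : PySem.List.pyRange 1 (1 + ((hs'.length : Int) + 1)) 1
        = PySem.List.pyRange 1 (1 + (hs'.length : Int)) 1 ++ [1 + (hs'.length : Int)] := by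
      rw [show (1 + ((hs'.length : Int) + 1)) = (1 + (hs'.length : Int)) + 1 by ring,
        PySem.List.pyRange_one_succ_right (by omega)]
    rw [hr, List.foldl_append]
    simp only [List.append_assoc, List.singleton_append]
    rw [ih t0 (t :: tail)]
    simp only [List.foldl_cons, List.foldl_nil]
    have hidx : (1 + (hs'.length : Int)) = ((hs'.length + 1 : Nat) : Int) := by push_cast; ring
    rw [hidx, PySem.List.pyGetD_natCast]
    have hget : (t0 :: (hs' ++ t :: tail)).getD (hs'.length + 1) [] = t := by
      rw [List.getD_cons_succ, List.getD_eq_getElem?_getD, List.getElem?_append_right (le_refl _)]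
      simp
    rw [hget]
    have : t0 :: (hs' ++ [t]) = (t0 :: hs') ++ [t] := by simp
    rw [this, pv_join_concat _ _ (by simp)]

theorem pv_contains_iff (t : List Char) :
    ([['T','0'],['T','1'],['T','2'],['T','3'],['T','4'],['T','5'],['T','6'],['T','7']].contains t = true)
    ↔ ∃ d ∈ (['0','1','2','3','4','5','6','7'] : List Char), t = ['T', d] := by
  constructor
  · intro h
    simp only [List.contains_iff_mem, List.mem_cons, List.not_mem_nil, or_false] at h
    rcases h with h|h|h|h|h|h|h|h <;> subst h <;> exact ⟨_, by simp, rfl⟩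
  · rintro ⟨d, hd, rfl⟩
    simp only [List.mem_cons, List.not_mem_nil, or_false] at hd
    rcases hd with h|h|h|h|h|h|h|h <;> subst h <;> decide

theorem pv_main (fault : String) : get_fault_base fault = get_fault_base_alt fault := by
  simp only [get_fault_base, get_fault_base_alt]
  rw [pv_splitOn_eq]
  obtain hnil | ⟨hs, lastTok, hout⟩ := (pvSplitAux fault.toList []).eq_nil_or_concat
  · exact absurd hnil (pvSplitAux_ne_nil _ _)
  rw [List.concat_eq_append] at hout
  have hjoin : PySem.Chars.join ['_'] (pvSplitAux fault.toList []) = fault.toList := by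
    simpa using pv_join_splitAux fault.toList []
  have hno : ∀ t ∈ pvSplitAux fault.toList [], '_' ∉ t :=
    pv_no_underscore fault.toList [] (by simp)
  have hlastmem : lastTok ∈ pvSplitAux fault.toList [] := by rw [hout]; simp
  have hnolast : '_' ∉ lastTok := hno lastTok hlastmem
  rw [hout] at hjoin ⊢
  have hlenidx : PySem.List.len (hs ++ [lastTok]) - 1 = ((hs.length : Nat) : Int) := by
    simp [PySem.List.len_eq]
  rw [hlenidx]
  have hlastget : PySem.List.pyGetD (hs ++ [lastTok]) ((hs.length : Nat) : Int) [] = lastTok := by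
    rw [PySem.List.pyGetD_natCast, List.getD_eq_getElem?_getD,
      List.getElem?_append_right (le_refl _)]
    simp
  rw [hlastget]
  by_cases hA :
      ([['T','0'],['T','1'],['T','2'],['T','3'],['T','4'],['T','5'],['T','6'],['T','7']].contains lastTok = true)
  · -- last token is some ['T', d]
    obtain ⟨d, hd, rfl⟩ := (pv_contains_iff lastTok).mp hA
    rw [if_pos hA]
    cases hs with
    | nil =>
      -- whole string is "Td": A keeps it, B's suffix test cannot fire on a 2-char string
      simp only [List.nil_append, PySem.Chars.join_singleton] at hjoin
      have hBany : (['0','1','2','3','4','5','6','7'].any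
          (fun d' => PySem.Chars.endswith fault.toList ['_','T',d'])) = false := by
        rw [List.any_eq_false]
        intro d' _
        simp only [PySem.Chars.endswith_iff]
        intro hsuf
        have := hsuf.length_le
        rw [← hjoin] at this
        simp at this
      rw [hBany, if_neg (by simp)]
      have : PySem.List.pyRange 1 ((0 : Nat) : Int) 1 = [] := by decide
      rw [show (([] : List (List Char)).length : Int) = ((0:Nat) : Int) by simp, this]
      simp only [List.foldl_nil, List.nil_append]
      rw [show PySem.List.pyGetD [['T',d]] 0 [] = ['T',d] from PySem.List.pyGetD_zero_cons _ _ _]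
      rw [hjoin]
      simp
    | cons t0 hs' =>
      -- fault = join (t0::hs') ++ '_' :: 'T' :: d
      have hcs : fault.toList = PySem.Chars.join ['_'] (t0 :: hs') ++ '_' :: 'T' :: [d] := by
        rw [← hjoin, show (t0 :: hs') ++ [['T',d]] = (t0 :: hs') ++ [['T',d]] from rfl]
        rw [pv_join_concat _ _ (by simp)]
      have hBany : (['0','1','2','3','4','5','6','7'].any
          (fun d' => PySem.Chars.endswith fault.toList ['_','T',d'])) = true := by
        rw [List.any_eq_true]
        refine ⟨d, hd, ?_⟩
        rw [PySem.Chars.endswith_iff, hcs]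
        exact ⟨PySem.Chars.join ['_'] (t0 :: hs'), rfl⟩
      rw [hBany, if_pos rfl]
      -- A side: the rejoin loop produces join (t0 :: hs')
      have hA0 : PySem.List.pyGetD ((t0 :: hs') ++ [['T',d]]) 0 [] = t0 := by
        rw [List.cons_append, show (0:Int) = ((0:Nat):Int) by norm_num, PySem.List.pyGetD_natCast]
        rfl
      have hlen2 : (((t0 :: hs').length : Nat) : Int) = 1 + (hs'.length : Int) := by
        push_cast [List.length_cons]; ring
      rw [hA0, hlen2]
      rw [show (t0 :: hs') ++ [['T',d]] = t0 :: (hs' ++ [['T',d]]) from rfl]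
      rw [pv_foldl_join hs' t0 [['T',d]]]
      -- B side: drop last three characters
      have h3 : PySem.List.slice fault.toList none (some (-3))
          = fault.toList.take (fault.toList.length - 3) := by
        rw [PySem.List.slice_to_neg_ofNat fault.toList 3 (by omega)]
      rw [h3, hcs]
      have : (PySem.Chars.join ['_'] (t0 :: hs') ++ '_' :: 'T' :: [d]).length - 3
          = (PySem.Chars.join ['_'] (t0 :: hs')).length := by simp
      rw [this, List.take_left]
  · -- last token is not a T-suffix: both sides return the input unchanged
    rw [if_neg hA]
    have hBany : (['0','1','2','3','4','5','6','7'].any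
        (fun d' => PySem.Chars.endswith fault.toList ['_','T',d'])) = false := by
      rw [List.any_eq_false]
      intro d' hd'
      simp only [PySem.Chars.endswith_iff]
      intro hsuf
      cases hs with
      | nil =>
        simp only [List.nil_append, PySem.Chars.join_singleton] at hjoin
        exact hnolast (by rw [hjoin]; exact hsuf.subset (by simp))
      | cons t0 hs' =>
        have hcs : fault.toList = PySem.Chars.join ['_'] (t0 :: hs') ++ '_' :: lastTok := by
          rw [← hjoin, pv_join_concat _ _ (by simp)]
        have hs1 : ('_' :: lastTok) <:+ fault.toList := by
          rw [hcs]; exact ⟨PySem.Chars.join ['_'] (t0 :: hs'), rfl⟩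
        rcases List.suffix_or_suffix_of_suffix hsuf hs1 with hcase | hcase
        · -- ['_','T',d'] <:+ '_' :: lastTok
          rcases List.suffix_cons_iff.mp hcase with heq | hcase2
          · -- lastTok = ['T', d']: contradicts hA
            have : lastTok = ['T', d'] := by injection heq with h1 h2; exact h2.symm
            apply hA
            rw [this, (pv_contains_iff _)]
            exact ⟨d', hd', rfl⟩
          · exact hnolast (hcase2.subset (by simp))
        · -- '_' :: lastTok <:+ ['_','T',d']: lastTok too short to be a token ending here
          rcases List.suffix_cons_iff.mp hcase with heq | hcase2
          · -- '_' :: lastTok = ['_','T',d'] → lastTok = ['T',d'] → contradicts hA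
            have : lastTok = ['T', d'] := by
              have h2 := congrArg List.tail heq
              simpa using h2
            apply hA
            rw [this, (pv_contains_iff _)]
            exact ⟨d', hd', rfl⟩
          · -- '_' :: lastTok <:+ ['T',d']
            rcases List.suffix_cons_iff.mp hcase2 with heq | hcase3
            · exact absurd (by injection heq) (by decide : ¬ ('_' = 'T'))
            · rcases List.suffix_cons_iff.mp hcase3 with heq | hcase4
              · have hdu : '_' = d' := by injection heq
                revert hd'
                rw [← hdu]
                decide
              · simpa using hcase4.length_le
    rw [hBany, if_neg (by simp)]
    simp

-- ===== VERDICT (by name: the statement is the Claim_ definition above) =====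
theorem get_fault_base_spec : Claim_equal_get_fault_base := by
  intro fault _
  unfold Spec_get_fault_base
  exact pv_main fault
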